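-- pv_equiv track=rewrite | github.com/steveopen1/ApiRed | core/collectors/auto_auth.py | _build_login_body
-- ===== SOURCE A (Python) =====
-- from typing import Dict, List, Optional, Set, Tuple, Any
--
-- def _build_login_body(param_names: List[str]) -> Dict[str, Any]:
--     """构建登录请求体"""
--     body = {}
--
--     for name in param_names:
--         name_lower = name.lower()
--         if 'password' in name_lower:
--             body[name] = 'admin123'
--         elif 'username' in name_lower:
--             body[name] = 'admin'
--         elif 'mobile' in name_lower or 'phone' in name_lower:
--             body[name] = '13800138000'
--         elif 'smscode' in name_lower or 'vcode' in name_lower: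
--             body[name] = '123456'
--         elif 'code' in name_lower:
--             body[name] = ''
--         else:
--             body[name] = 'test'
--
--     return body
-- ===== SOURCE B (Python) =====
-- _RULES = [
--     (('password',), 'admin123'),
--     (('username',), 'admin'),
--     (('mobile', 'phone'), '13800138000'),
--     (('smscode', 'vcode'), '123456'),
--     (('code',), ''),
-- ]
--
-- def _build_login_body(param_names):
--     # Layered overwrite: start everyone at the default, then apply the rules
--     # from lowest to highest priority, overwriting; the highest-priority
--     # matching rule ends up winning.
--     body = {name: 'test' for name in param_names}
--     for keywords, value in reversed(_RULES):
--         for name in param_names: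
--             name_lower = name.lower()
--             if any(kw in name_lower for kw in keywords):
--                 body[name] = value
--     return body
-- ===== Notes on version B (the rewrite author's own statement) =====
-- stated objective: alternative
-- what changed: Replaces A's per-name first-match if/elif chain with a layered multi-pass algorithm: every name starts at the default 'test', then the rules are applied rule-major in reverse priority order, each pass overwriting matching names so the highest-priority matching rule wins.
import Mathlib
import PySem

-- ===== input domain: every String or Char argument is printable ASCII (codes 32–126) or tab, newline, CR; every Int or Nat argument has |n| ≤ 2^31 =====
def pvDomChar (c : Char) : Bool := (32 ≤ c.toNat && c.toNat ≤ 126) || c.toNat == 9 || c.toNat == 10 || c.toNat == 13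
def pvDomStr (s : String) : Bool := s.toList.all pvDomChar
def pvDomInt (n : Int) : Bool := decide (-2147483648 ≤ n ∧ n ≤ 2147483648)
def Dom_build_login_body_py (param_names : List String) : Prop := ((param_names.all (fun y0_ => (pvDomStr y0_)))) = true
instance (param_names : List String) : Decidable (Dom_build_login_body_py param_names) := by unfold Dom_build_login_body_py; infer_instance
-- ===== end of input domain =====

-- B replaces A's per-name first-match if/elif chain with layered rule-major passes:
-- all names start at 'test', then rules overwrite from lowest to highest priority (alternative).

-- ===== PORT A =====
def build_login_body_py (param_names : List String) : List (String × String) :=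
  (param_names.foldl (fun (body : PySem.Dict String String) name =>
    let name_lower := PySem.Str.lower name
    if PySem.Str.isIn "password" name_lower then body.insert name "admin123"
    else if PySem.Str.isIn "username" name_lower then body.insert name "admin"
    else if PySem.Str.isIn "mobile" name_lower || PySem.Str.isIn "phone" name_lower then
      body.insert name "13800138000"
    else if PySem.Str.isIn "smscode" name_lower || PySem.Str.isIn "vcode" name_lower then
      body.insert name "123456"
    else if PySem.Str.isIn "code" name_lower then body.insert name ""
    else body.insert name "test") PySem.Dict.empty).items

-- ===== PORT B =====
def pvRules : List (List String × String) :=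
  [(["password"], "admin123"),
   (["username"], "admin"),
   (["mobile", "phone"], "13800138000"),
   (["smscode", "vcode"], "123456"),
   (["code"], "")]

def build_login_body_py_alt (param_names : List String) : List (String × String) :=
  (pvRules.reverse.foldl (fun (body : PySem.Dict String String) rule =>
      param_names.foldl (fun d name =>
        if rule.1.any (fun kw => PySem.Str.isIn kw (PySem.Str.lower name)) then
          d.insert name rule.2
        else d) body)
    (param_names.foldl (fun (d : PySem.Dict String String) name => d.insert name "test")
      PySem.Dict.empty)).items

-- ===== PRECONDITION & SPEC =====
def Spec_build_login_body_py (param_names : List String) (out : List (String × String)) : Prop := out = build_login_body_py_alt param_names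
instance (param_names : List String) (out : List (String × String)) : Decidable (Spec_build_login_body_py param_names out) := by unfold Spec_build_login_body_py; infer_instance

-- ===== CLAIM =====
def Claim_equal_build_login_body_py : Prop := ∀ (param_names : List String), Dom_build_login_body_py param_names → Spec_build_login_body_py param_names (build_login_body_py param_names)

-- ===== LEMMAS AND PROOFS =====

-- A's if/elif chain as a value function (proof helper only).
def pvChain (name : String) : String :=
  let nl := PySem.Str.lower name
  if PySem.Str.isIn "password" nl then "admin123"
  else if PySem.Str.isIn "username" nl then "admin"
  else if PySem.Str.isIn "mobile" nl || PySem.Str.isIn "phone" nl then "13800138000"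
  else if PySem.Str.isIn "smscode" nl || PySem.Str.isIn "vcode" nl then "123456"
  else if PySem.Str.isIn "code" nl then ""
  else "test"

-- A's loop body IS an unconditional insert of pvChain.
theorem pv_stepA_eq :
    (fun (body : PySem.Dict String String) name =>
      let name_lower := PySem.Str.lower name
      if PySem.Str.isIn "password" name_lower then body.insert name "admin123"
      else if PySem.Str.isIn "username" name_lower then body.insert name "admin"
      else if PySem.Str.isIn "mobile" name_lower || PySem.Str.isIn "phone" name_lower then
        body.insert name "13800138000"
      else if PySem.Str.isIn "smscode" name_lower || PySem.Str.isIn "vcode" name_lower then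
        body.insert name "123456"
      else if PySem.Str.isIn "code" name_lower then body.insert name ""
      else body.insert name "test")
    = fun (body : PySem.Dict String String) name => body.insert name (pvChain name) := by
  funext body name
  simp only [pvChain]
  split_ifs <;> rfl

-- getD after an unconditional insert loop with a per-key value function.
theorem pv_getD_insert_loop (l : List String) (f : String → String)
    (d : PySem.Dict String String) (k dflt : String) :
    (l.foldl (fun d n => d.insert n (f n)) d).getD k dflt
      = if k ∈ l then f k else d.getD k dflt := by
  induction l generalizing d with
  | nil => simp
  | cons x xs ih =>
      simp only [List.foldl_cons, ih, PySem.Dict.getD_insert, List.mem_cons]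
      by_cases hxs : k ∈ xs <;> by_cases hx : k = x <;> simp [hxs, hx]

-- getD after one conditional overwrite pass.
theorem pv_getD_cond_pass (l : List String) (c : String → Bool) (v : String)
    (d : PySem.Dict String String) (k dflt : String) :
    (l.foldl (fun d n => if c n then d.insert n v else d) d).getD k dflt
      = if k ∈ l ∧ c k = true then v else d.getD k dflt := by
  induction l generalizing d with
  | nil => simp
  | cons x xs ih =>
      simp only [List.foldl_cons, List.mem_cons]
      by_cases hcx : c x = true
      · simp only [hcx, if_true, ih, PySem.Dict.getD_insert]
        by_cases hxs : k ∈ xs <;> by_cases hx : k = x <;>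
          simp [hxs, hx, hcx]
      · simp only [hcx, ih]
        by_cases hx : k = x
        · subst hx; simp [hcx]
        · simp [hx]
  
-- a conditional overwrite pass over keys the dict already contains keeps the key list.
theorem pv_keys_cond_pass (l : List String) (c : String → Bool) (v : String)
    (d : PySem.Dict String String) (h : ∀ n ∈ l, d.contains n = true) :
    (l.foldl (fun d n => if c n then d.insert n v else d) d).keys = d.keys := by
  induction l generalizing d with
  | nil => rfl
  | cons x xs ih =>
      simp only [List.foldl_cons]
      by_cases hcx : c x = true
      · simp only [hcx, if_true]
        rw [ih (d.insert x v) (fun n hn => by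
          rw [PySem.Dict.contains_insert]
          simp [h n (List.mem_cons_of_mem _ hn)])]
        exact PySem.Dict.keys_insert_of_contains d v (h x (List.mem_cons_self))
      · simp only [hcx]
        exact ih d (fun n hn => h n (List.mem_cons_of_mem _ hn))

-- ===== VERDICT =====
theorem build_login_body_py_spec : Claim_equal_build_login_body_py := by
  intro param_names _
  unfold Spec_build_login_body_py build_login_body_py build_login_body_py_alt
  rw [pv_stepA_eq]
  -- base dict shared facts
  set d0 : PySem.Dict String String :=
    param_names.foldl (fun d name => d.insert name "test") PySem.Dict.empty with hd0
  have hkeys0 : d0.keys = PySem.Set.ofList param_names := by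
    rw [hd0, PySem.Dict.keys_foldl_insert param_names (fun _ _ => "test"),
        PySem.Dict.keys_empty, PySem.Set.update_nil_left]
  have hmem0 : ∀ n, n ∈ d0.keys ↔ n ∈ param_names := by
    intro n
    rw [hkeys0]
    exact PySem.Set.mem_ofList param_names n
  have hnd0 : d0.keys.Nodup := by
    rw [hd0]
    exact PySem.Dict.nodup_keys_foldl_insert _ _ _ PySem.Dict.nodup_keys_empty
  have hcont0 : ∀ n ∈ param_names, d0.contains n = true := by
    intro n hn
    rw [PySem.Dict.contains_iff_mem_keys, hmem0]; exact hn
  -- unfold the five rule passes of B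
  simp only [pvRules, List.reverse_cons, List.reverse_nil, List.nil_append, List.cons_append,
    List.foldl_cons, List.foldl_nil]
  -- name the successive dicts; keys are preserved through every pass
  -- A's dict
  set dA : PySem.Dict String String :=
    param_names.foldl (fun body name => body.insert name (pvChain name)) PySem.Dict.empty with hdA
  have hkeysA : dA.keys = PySem.Set.ofList param_names := by
    rw [hdA, PySem.Dict.keys_foldl_insert param_names (fun _ n => pvChain n),
        PySem.Dict.keys_empty, PySem.Set.update_nil_left]
  have hndA : dA.keys.Nodup := by
    rw [hdA]; exact PySem.Dict.nodup_keys_foldl_insert _ _ _ PySem.Dict.nodup_keys_empty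
  -- B's final dict: peel the five passes, tracking contains/keys
  -- pass conditions
  set c1 : String → Bool := fun name => (["code"] : List String).any (fun kw => PySem.Str.isIn kw (PySem.Str.lower name)) with hc1
  set c2 : String → Bool := fun name => (["smscode", "vcode"] : List String).any (fun kw => PySem.Str.isIn kw (PySem.Str.lower name)) with hc2
  set c3 : String → Bool := fun name => (["mobile", "phone"] : List String).any (fun kw => PySem.Str.isIn kw (PySem.Str.lower name)) with hc3
  set c4 : String → Bool := fun name => (["username"] : List String).any (fun kw => PySem.Str.isIn kw (PySem.Str.lower name)) with hc4
  set c5 : String → Bool := fun name => (["password"] : List String).any (fun kw => PySem.Str.isIn kw (PySem.Str.lower name)) with hc5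
  set e1 := param_names.foldl (fun d n => if c1 n then d.insert n "" else d) d0 with he1
  set e2 := param_names.foldl (fun d n => if c2 n then d.insert n "123456" else d) e1 with he2
  set e3 := param_names.foldl (fun d n => if c3 n then d.insert n "13800138000" else d) e2 with he3
  set e4 := param_names.foldl (fun d n => if c4 n then d.insert n "admin" else d) e3 with he4
  set e5 := param_names.foldl (fun d n => if c5 n then d.insert n "admin123" else d) e4 with he5
  have hk1 : e1.keys = d0.keys := pv_keys_cond_pass _ _ _ _ hcont0
  have hcont1 : ∀ n ∈ param_names, e1.contains n = true := by
    intro n hn; rw [PySem.Dict.contains_iff_mem_keys, hk1, hmem0]; exact hn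
  have hk2 : e2.keys = d0.keys := by rw [he2, pv_keys_cond_pass _ _ _ _ hcont1]; exact hk1
  have hcont2 : ∀ n ∈ param_names, e2.contains n = true := by
    intro n hn; rw [PySem.Dict.contains_iff_mem_keys, hk2, hmem0]; exact hn
  have hk3 : e3.keys = d0.keys := by rw [he3, pv_keys_cond_pass _ _ _ _ hcont2]; exact hk2
  have hcont3 : ∀ n ∈ param_names, e3.contains n = true := by
    intro n hn; rw [PySem.Dict.contains_iff_mem_keys, hk3, hmem0]; exact hn
  have hk4 : e4.keys = d0.keys := by rw [he4, pv_keys_cond_pass _ _ _ _ hcont3]; exact hk3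
  have hcont4 : ∀ n ∈ param_names, e4.contains n = true := by
    intro n hn; rw [PySem.Dict.contains_iff_mem_keys, hk4, hmem0]; exact hn
  have hk5 : e5.keys = d0.keys := by rw [he5, pv_keys_cond_pass _ _ _ _ hcont4]; exact hk4
  have hnd5 : e5.keys.Nodup := by rw [hk5]; exact hnd0
  -- getD of both sides agrees
  have hgetD : ∀ k, dA.getD k "test" = e5.getD k "test" := by
    intro k
    rw [hdA, pv_getD_insert_loop]
    rw [he5, pv_getD_cond_pass, he4, pv_getD_cond_pass, he3, pv_getD_cond_pass,
        he2, pv_getD_cond_pass, he1, pv_getD_cond_pass, hd0, pv_getD_insert_loop]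
    by_cases hk : k ∈ param_names
    · simp only [hk, true_and, if_true, pvChain, hc1, hc2, hc3, hc4, hc5,
        List.any_cons, List.any_nil, Bool.or_false]
    · simp [hk]
  -- items equality
  rw [PySem.Dict.items_eq_map_keys dA hndA "test",
      PySem.Dict.items_eq_map_keys e5 hnd5 "test", hkeysA, ← hkeys0, ← hk5]
  exact List.map_congr_left (fun k _ => by rw [hgetD k])
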